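-- pv_equiv track=rewrite | github.com/pypi-data/pypi-mirror-22 | packages/coquery/coquery-0.10.0.1.tar.gz/coquery-0.10.0.1/coquery/tokens.py | has_wildcards
-- ===== SOURCE A (Python) =====
-- def has_wildcards(s, replace=False):
--     """
--     Check if there are MySQL wildcards in the given string.
--
--     This method considers non-escaped occurrence of '%' and '_' as
--     wildcards.
--
--     Parameters
--     ----------
--     s : string
--         The string to be processed
--
--     Returns
--     -------
--     s : string
--         The string with proper replacements and escapes
--     """
--     skip_next = False
--
--     if s in set(["%", "_"]):
--         return True
--     for x in s:
--         if skip_next: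
--             skip_next = False
--         else:
--             if x == "\\":
--                 skip_next = True
--             else:
--                 if x in ["%", "_"]:
--                     return True
--     return False
-- ===== SOURCE B (Python) =====
-- import re
--
-- def has_wildcards(s, replace=False):
--     # Remove-then-scan: strip every escape pair '\<char>' left-to-right,
--     # then any remaining '%' or '_' is an unescaped wildcard.
--     cleaned = re.sub(r'\\.', '', s, flags=re.DOTALL)
--     return '%' in cleaned or '_' in cleaned
-- ===== Notes on version B (the rewrite author's own statement) =====
-- stated objective: simpler
-- what changed: Replaced the char-by-char skip_next state machine (plus the redundant singleton-string guard) with a remove-then-scan decomposition: one regex substitution strips every escape pair, then a plain membership test looks for a remaining wildcard character.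
import Mathlib
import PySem

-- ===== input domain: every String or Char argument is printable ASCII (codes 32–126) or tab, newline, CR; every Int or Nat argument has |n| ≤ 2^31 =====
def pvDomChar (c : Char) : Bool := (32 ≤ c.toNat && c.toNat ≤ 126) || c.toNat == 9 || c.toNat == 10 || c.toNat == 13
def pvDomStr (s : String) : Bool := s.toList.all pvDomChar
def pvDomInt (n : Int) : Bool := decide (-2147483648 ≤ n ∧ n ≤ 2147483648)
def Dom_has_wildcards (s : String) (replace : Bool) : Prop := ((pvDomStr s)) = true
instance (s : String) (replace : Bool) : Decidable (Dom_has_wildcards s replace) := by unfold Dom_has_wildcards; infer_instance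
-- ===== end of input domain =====

-- B replaces A's char-by-char skip_next state machine (and its redundant singleton guard)
-- with a remove-then-scan decomposition: strip escape pairs first, then look for '%'/'_'.


-- ===== PORT A =====
-- the for-loop with the skip_next flag and the early `return True`
def pvScanA : List Char → Bool → Bool
  | [], _ => false
  | x :: xs, skip =>
    if skip then pvScanA xs false
    else if x = '\\' then pvScanA xs true
    else if x = '%' ∨ x = '_' then true
    else pvScanA xs false

def has_wildcards (s : String) (replace : Bool) : Bool :=
  if s = "%" ∨ s = "_" then true
  else pvScanA s.toList false

-- ===== PORT B =====
-- re.sub(r'\\.', '', s, flags=re.DOTALL): drop each backslash together with the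
-- following character, left-to-right non-overlapping; a trailing lone backslash stays.
def pvStripEsc : List Char → List Char
  | [] => []
  | c :: rest =>
    if c = '\\' then
      match rest with
      | [] => [c]
      | _ :: rest' => pvStripEsc rest'
    else c :: pvStripEsc rest

def has_wildcards_alt (s : String) (replace : Bool) : Bool :=
  (pvStripEsc s.toList).any (fun c => c == '%' || c == '_')

-- ===== PRECONDITION & SPEC =====
def Spec_has_wildcards (s : String) (replace : Bool) (out : Bool) : Prop := out = has_wildcards_alt s replace
instance (s : String) (replace : Bool) (out : Bool) : Decidable (Spec_has_wildcards s replace out) := by unfold Spec_has_wildcards; infer_instance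

-- ===== CLAIM (what is proved, stated in full; the proofs are below) =====
def Claim_equal_has_wildcards : Prop := ∀ (s : String) (replace : Bool), Dom_has_wildcards s replace → Spec_has_wildcards s replace (has_wildcards s replace)

-- ===== LEMMAS AND PROOFS =====

-- the state machine on a cleaned-up list equals a plain wildcard scan of the stripped list
theorem pvScanA_eq_strip (l : List Char) :
    pvScanA l false = (pvStripEsc l).any (fun c => c == '%' || c == '_') := by
  induction l using pvStripEsc.induct with
  | case1 => simp [pvScanA, pvStripEsc]
  | case2 => simp [pvScanA, pvStripEsc]
  | case3 _ _ ih => simpa [pvScanA, pvStripEsc] using ih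
  | case4 c rest h ih =>
      rw [show pvStripEsc (c :: rest) = c :: pvStripEsc rest by
            rw [pvStripEsc.eq_def]; simp [h]]
      simp only [pvScanA, if_neg h, List.any_cons, ih, Bool.false_eq_true,
        if_false]
      by_cases hw : c = '%' ∨ c = '_'
      · rcases hw with hw | hw <;> simp [hw]
      · rw [if_neg hw]
        rcases not_or.mp hw with ⟨h1, h2⟩
        simp [h1, h2]

-- the singleton guard is redundant: pvScanA already returns true there
theorem has_wildcards_eq_scan (s : String) (replace : Bool) :
    has_wildcards s replace = pvScanA s.toList false := by
  unfold has_wildcards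
  split_ifs with h
  · rcases h with h | h <;> subst h <;> decide
  · rfl

-- ===== VERDICT (by name: the statement is the Claim_ definition above) =====
theorem has_wildcards_spec : Claim_equal_has_wildcards := by
  intro s replace _
  unfold Spec_has_wildcards has_wildcards_alt
  rw [has_wildcards_eq_scan, pvScanA_eq_strip]
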